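-- pv_equiv track=rewrite | github.com/christ2go/ma_code | satgen_pysat.py | is_neutral
-- ===== SOURCE A (Python) =====
-- def is_single_transposition(tup1, tup2):
--     diffs = [(a, b) for a, b in zip(tup1, tup2) if a != b]
--     return (len(diffs) == 2 and diffs[0] == diffs[1][::-1], sorted(diffs[0])) if len(diffs) == 2 else (False, None)
--
-- def is_neutral(profile1, profile2):
--     if len(profile1) != len(profile2):
--         return False, None
--
--     swapped = None
--     for pref1, pref2 in zip(profile1, profile2):
--         transposed, options = is_single_transposition(pref1, pref2)
--         if not transposed:
--             return False, None
--         if swapped is None: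
--             swapped = options
--         elif swapped != options:
--             return False, None
--
--     return True, swapped
-- ===== SOURCE B (Python) =====
-- def is_neutral(profile1, profile2):
--     if len(profile1) != len(profile2):
--         return False, None
--     # build the per-pair table of swap signatures (None = not a single transposition)
--     sigs = [_swap_signature(p1, p2) for p1, p2 in zip(profile1, profile2)]
--     if any(s is None for s in sigs):
--         return False, None
--     # reduce: collect the distinct signatures in first-occurrence order
--     # (lists are unhashable, so the distinct collection is a dedup list)
--     distinct = []
--     for s in sigs:
--         if s not in distinct:
--             distinct = distinct + [s]
--     if len(distinct) > 1:
--         return False, None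
--     return True, (distinct[0] if distinct else None)
--
-- def _swap_signature(pref1, pref2):
--     diffs = [(a, b) for a, b in zip(pref1, pref2) if a != b]
--     if len(diffs) == 2 and diffs[0] == diffs[1][::-1]:
--         return sorted(diffs[0])
--     return None
-- ===== Notes on version B (the rewrite author's own statement) =====
-- stated objective: alternative
-- what changed: A's early-exit scan carrying a 'swapped' accumulator is replaced by a map-then-reduce decomposition: first a table of per-pair swap signatures (or None), then a global decision via an any-None check and a dedup of the distinct signatures.
import Mathlib
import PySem

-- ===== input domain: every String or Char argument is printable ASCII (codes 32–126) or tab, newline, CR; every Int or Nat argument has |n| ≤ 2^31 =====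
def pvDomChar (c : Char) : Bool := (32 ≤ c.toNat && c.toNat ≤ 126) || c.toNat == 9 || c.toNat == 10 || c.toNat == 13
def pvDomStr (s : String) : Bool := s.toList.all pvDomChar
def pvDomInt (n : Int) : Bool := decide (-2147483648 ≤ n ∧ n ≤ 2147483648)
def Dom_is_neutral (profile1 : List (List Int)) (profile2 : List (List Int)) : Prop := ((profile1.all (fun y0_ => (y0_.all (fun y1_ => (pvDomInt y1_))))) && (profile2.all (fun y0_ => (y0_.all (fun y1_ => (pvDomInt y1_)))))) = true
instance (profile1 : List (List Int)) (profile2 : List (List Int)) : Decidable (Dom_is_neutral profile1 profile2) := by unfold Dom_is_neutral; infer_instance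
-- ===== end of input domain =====

-- B replaces A's early-exit scan with a 'swapped' accumulator by a map-then-reduce
-- decomposition (per-pair signature table, then any-None check and dedup of distinct
-- signatures); objective: alternative decomposition, same cost.

-- ===== PORT A =====
-- is_single_transposition(tup1, tup2)
def pvIstA (tup1 tup2 : List Int) : Bool × Option (List Int) :=
  match (tup1.zip tup2).filter (fun p => p.1 ≠ p.2) with
  | [d0, d1] => (decide (d0 = (d1.2, d1.1)), some (PySem.List.sorted [d0.1, d0.2] (fun x => x)))
  | _ => (false, none)

-- the for-loop over zip(profile1, profile2) carrying 'swapped'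
def pvLoopA : List (List Int × List Int) → Option (List Int) → Bool × Option (List Int)
  | [], swapped => (true, swapped)
  | (pref1, pref2) :: rest, swapped =>
    if !(pvIstA pref1 pref2).1 then (false, none)
    else match swapped with
      | none => pvLoopA rest (pvIstA pref1 pref2).2
      | some s => if some s ≠ (pvIstA pref1 pref2).2 then (false, none) else pvLoopA rest (some s)

def is_neutral (profile1 : List (List Int)) (profile2 : List (List Int)) : Bool × Option (List Int) :=
  if profile1.length ≠ profile2.length then (false, none)
  else pvLoopA (profile1.zip profile2) none

-- ===== PORT B =====
-- _swap_signature(pref1, pref2)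
def pvSigB (pref1 pref2 : List Int) : Option (List Int) :=
  match (pref1.zip pref2).filter (fun p => p.1 ≠ p.2) with
  | [d0, d1] => if d0 = (d1.2, d1.1) then some (PySem.List.sorted [d0.1, d0.2] (fun x => x)) else none
  | _ => none

-- the dedup loop: distinct signatures in first-occurrence order
def pvDedupB : List (Option (List Int)) → List (Option (List Int)) → List (Option (List Int))
  | [], distinct => distinct
  | s :: rest, distinct =>
    if s ∈ distinct then pvDedupB rest distinct else pvDedupB rest (distinct ++ [s])

def is_neutral_alt (profile1 : List (List Int)) (profile2 : List (List Int)) : Bool × Option (List Int) :=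
  if profile1.length ≠ profile2.length then (false, none)
  else
    let sigs := (profile1.zip profile2).map (fun z => pvSigB z.1 z.2)
    if sigs.any (fun s => s = none) then (false, none)
    else
      let distinct := pvDedupB sigs []
      if distinct.length > 1 then (false, none)
      else match distinct with
        | [] => (true, none)
        | s :: _ => (true, s)

-- ===== PRECONDITION & SPEC =====
def Spec_is_neutral (profile1 : List (List Int)) (profile2 : List (List Int)) (out : Bool × Option (List Int)) : Prop := out = is_neutral_alt profile1 profile2
instance (profile1 : List (List Int)) (profile2 : List (List Int)) (out : Bool × Option (List Int)) : Decidable (Spec_is_neutral profile1 profile2 out) := by unfold Spec_is_neutral; infer_instance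

-- ===== CLAIM (what is proved, stated in full; the proofs are below) =====
def Claim_equal_is_neutral : Prop := ∀ (profile1 : List (List Int)) (profile2 : List (List Int)), Dom_is_neutral profile1 profile2 → Spec_is_neutral profile1 profile2 (is_neutral profile1 profile2)

-- ===== LEMMAS AND PROOFS =====

-- A's per-pair check, expressed through B's signature function
theorem ist_of_sig (p1 p2 : List Int) :
    ((pvIstA p1 p2).1 = true ∧ (pvIstA p1 p2).2 = pvSigB p1 p2 ∧ pvSigB p1 p2 ≠ none)
    ∨ ((pvIstA p1 p2).1 = false ∧ pvSigB p1 p2 = none) := by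
  simp only [pvSigB, pvIstA]
  cases h : (p1.zip p2).filter (fun p => p.1 ≠ p.2) with
  | nil => exact Or.inr ⟨rfl, rfl⟩
  | cons d0 t =>
    cases t with
    | nil => exact Or.inr ⟨rfl, rfl⟩
    | cons d1 t2 =>
      cases t2 with
      | nil =>
        by_cases hd : d0 = (d1.2, d1.1)
        · exact Or.inl ⟨by simp [hd], by simp [hd], by simp [hd]⟩
        · exact Or.inr ⟨by simp [hd], by simp [hd]⟩
      | cons c cs => exact Or.inr ⟨rfl, rfl⟩

theorem dedup_length_mono : ∀ (l acc : List (Option (List Int))), acc.length ≤ (pvDedupB l acc).length := by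
  intro l
  induction l with
  | nil => intro acc; exact Nat.le_refl _
  | cons s rest ih =>
    intro acc
    unfold pvDedupB
    by_cases hs : s ∈ acc
    · rw [if_pos hs]; exact ih acc
    · rw [if_neg hs]
      exact le_trans (by simp) (ih (acc ++ [s]))

theorem dedup_length_lt : ∀ (l acc : List (Option (List Int))) (x : Option (List Int)),
    x ∈ l → x ∉ acc → acc.length < (pvDedupB l acc).length := by
  intro l
  induction l with
  | nil => intro acc x hx; cases hx
  | cons s rest ih =>
    intro acc x hx hacc
    unfold pvDedupB
    by_cases hs : s ∈ acc
    · rw [if_pos hs]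
      have hxr : x ∈ rest := by
        cases hx with
        | head => exact absurd hs hacc
        | tail _ h => exact h
      exact ih acc x hxr hacc
    · rw [if_neg hs]
      have : (acc ++ [s]).length ≤ (pvDedupB rest (acc ++ [s])).length := dedup_length_mono _ _
      simp at this
      omega

theorem dedup_subset_eq : ∀ (l acc : List (Option (List Int))),
    (∀ x ∈ l, x ∈ acc) → pvDedupB l acc = acc := by
  intro l
  induction l with
  | nil => intro acc _; rfl
  | cons s rest ih =>
    intro acc h
    unfold pvDedupB
    rw [if_pos (h s (by simp))]
    exact ih acc (fun x hx => h x (List.mem_cons_of_mem _ hx))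

-- A's loop from a known 'swapped' state = "every remaining signature equals it"
theorem loop_some (zs : List (List Int × List Int)) (v : List Int) :
    pvLoopA zs (some v)
      = (if zs.all (fun z => pvSigB z.1 z.2 = some v) then (true, some v) else (false, none)) := by
  induction zs with
  | nil => simp [pvLoopA]
  | cons z rest ih =>
    obtain ⟨p1, p2⟩ := z
    rcases ist_of_sig p1 p2 with ⟨ht, h2, _⟩ | ⟨ht, hs0⟩
    · by_cases he : pvSigB p1 p2 = some v
      · have hL : pvLoopA ((p1, p2) :: rest) (some v) = pvLoopA rest (some v) := by
          simp [pvLoopA, ht, h2, he]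
        have hR : (((p1, p2) :: rest).all (fun z => pvSigB z.1 z.2 = some v))
            = (rest.all (fun z => pvSigB z.1 z.2 = some v)) := by
          simp [List.all_cons, he]
        rw [hL, hR, ih]
      · have hvne : some v ≠ (pvIstA p1 p2).2 := by rw [h2]; exact fun hc => he hc.symm
        have hL : pvLoopA ((p1, p2) :: rest) (some v) = (false, none) := by
          simp [pvLoopA, ht, hvne]
        have hR : (((p1, p2) :: rest).all (fun z => pvSigB z.1 z.2 = some v)) = false := by
          simp [List.all_cons, he]
        rw [hL, hR]; simp
    · simp [pvLoopA, ht, hs0]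

-- main loop equivalence: A's scan = B's map-then-reduce, on the zipped list
theorem loop_eq_reduce (zs : List (List Int × List Int)) :
    pvLoopA zs none
      = (let sigs := zs.map (fun z => pvSigB z.1 z.2)
         if sigs.any (fun s => s = none) then (false, none)
         else
           let distinct := pvDedupB sigs []
           if distinct.length > 1 then (false, none)
           else match distinct with
             | [] => (true, none)
             | s :: _ => (true, s)) := by
  cases zs with
  | nil => simp [pvLoopA, pvDedupB]
  | cons z rest =>
    obtain ⟨p1, p2⟩ := z
    rcases ist_of_sig p1 p2 with ⟨ht, h2, hne⟩ | ⟨ht, hs0⟩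
    · obtain ⟨v, hv⟩ := Option.ne_none_iff_exists'.mp hne
      have hLHS : pvLoopA ((p1, p2) :: rest) none = pvLoopA rest (some v) := by
        simp [pvLoopA, ht, h2, hv]
      rw [hLHS, loop_some]
      by_cases hall : rest.all (fun z => pvSigB z.1 z.2 = some v)
      · -- all the rest share the signature: B dedups the table to [some v]
        have hmem : ∀ x ∈ rest.map (fun z => pvSigB z.1 z.2), x = some v := by
          intro x hx
          obtain ⟨z, hz, hxz⟩ := List.mem_map.mp hx
          have := (List.all_eq_true.mp hall) z hz
          simp only [decide_eq_true_eq] at this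
          rw [← hxz]; exact this
        have hded : pvDedupB (some v :: rest.map (fun z => pvSigB z.1 z.2)) [] = [some v] := by
          unfold pvDedupB
          rw [if_neg (List.not_mem_nil)]
          exact dedup_subset_eq _ _ (by intro x hx; simp [hmem x hx])
        have hnone : ((some v :: rest.map (fun z => pvSigB z.1 z.2)).any (fun s => s = none)) = false := by
          simp only [List.any_eq_false]
          intro x hx
          rcases List.mem_cons.mp hx with h | h
          · simp [h]
          · simp [hmem x h]
        simp [hall, hv, hnone, hded]
      · -- some later pair has a different signature (or none): both sides reject
        obtain ⟨z, hz, hnev⟩ : ∃ z ∈ rest, pvSigB z.1 z.2 ≠ some v := by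
          by_contra hc
          push Not at hc
          exact hall (List.all_eq_true.mpr (fun z hz => by simp [hc z hz]))
        rw [if_neg (by simpa using hall)]
        by_cases hn : ((some v :: rest.map (fun z => pvSigB z.1 z.2)).any (fun s => s = none)) = true
        · simp [hv, hn]
        · simp only [Bool.not_eq_true] at hn
          have hlt : 1 < (pvDedupB (some v :: rest.map (fun z => pvSigB z.1 z.2)) []).length := by
            unfold pvDedupB
            rw [if_neg (List.not_mem_nil)]
            have hm : pvSigB z.1 z.2 ∈ rest.map (fun z => pvSigB z.1 z.2) :=
              List.mem_map.mpr ⟨z, hz, rfl⟩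
            have := dedup_length_lt (rest.map (fun z => pvSigB z.1 z.2)) ([] ++ [some v])
              (pvSigB z.1 z.2) hm (by simpa using hnev)
            simpa using this
          simp [hv, hn, hlt]
    · -- first pair rejected by A; B's table has none at position 0
      simp [pvLoopA, ht, hs0]

-- ===== VERDICT (by name: the statement is the Claim_ definition above) =====
theorem is_neutral_spec : Claim_equal_is_neutral := by
  intro profile1 profile2 _
  unfold Spec_is_neutral is_neutral is_neutral_alt
  by_cases h : profile1.length ≠ profile2.length
  · simp [h]
  · rw [if_neg h, if_neg h]
    exact loop_eq_reduce (profile1.zip profile2)
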